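-- pv_equiv track=rewrite | github.com/RohanVaradaraj/euclid | src/injrec_sed_fitting/sed_fitting_codes.py | skip_initial_lines
-- ===== SOURCE A (Python) =====
-- def skip_initial_lines(lines):
--     count = 0
--     for idx, line in enumerate(lines):
--         if not line.startswith("#"):
--             count += 1
--         if count == 3:
--             return lines[idx + 1 :]
--     return lines
-- ===== SOURCE B (Python) =====
-- def skip_initial_lines(lines):
--     positions = [i for i, line in enumerate(lines) if not line.startswith("#")]
--     if len(positions) >= 3:
--         return lines[positions[2] + 1:]
--     return lines
-- ===== Notes on version B (the rewrite author's own statement) =====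
-- stated objective: alternative
-- what changed: Replaces the early-exit counting loop over enumerated lines with an index-table decomposition: build the list of indices of non-comment lines, then slice after the third such index if it exists.
import Mathlib
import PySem

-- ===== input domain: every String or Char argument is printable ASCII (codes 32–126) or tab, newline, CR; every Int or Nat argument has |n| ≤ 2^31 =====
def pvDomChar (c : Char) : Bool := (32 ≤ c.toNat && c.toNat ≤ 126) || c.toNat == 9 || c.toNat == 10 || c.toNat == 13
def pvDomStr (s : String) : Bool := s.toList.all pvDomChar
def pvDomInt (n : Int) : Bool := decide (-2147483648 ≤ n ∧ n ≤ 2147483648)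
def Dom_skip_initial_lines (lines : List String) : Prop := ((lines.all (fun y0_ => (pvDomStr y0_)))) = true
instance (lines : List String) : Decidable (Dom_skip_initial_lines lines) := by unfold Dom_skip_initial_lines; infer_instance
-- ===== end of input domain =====

-- B replaces A's early-exit counting loop with an index-table decomposition (collect indices of non-comment lines, then slice); return value only, no side effects. Objective: alternative.
-- ===== PORT A =====
-- the for-loop with early return, over enumerate(lines), carrying count
def skipA_loop (lines : List String) (pairs : List (Int × String)) (count : Int) : List String :=
  match pairs with
  | [] => lines
  | (idx, line) :: rest =>
    let count := if ¬ PySem.Str.startswith line "#" then count + 1 else count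
    if count = 3 then PySem.List.slice lines (some (idx + 1)) none
    else skipA_loop lines rest count

def skip_initial_lines (lines : List String) : List String :=
  skipA_loop lines (PySem.List.enumerate lines) 0

-- ===== PORT B =====
def skip_initial_lines_alt (lines : List String) : List String :=
  let positions := ((PySem.List.enumerate lines).filter
      (fun p => ¬ PySem.Str.startswith p.2 "#")).map Prod.fst
  if 3 ≤ positions.length then
    match positions[2]? with
    | some i => PySem.List.slice lines (some (i + 1)) none
    | none => lines
  else lines

-- ===== PRECONDITION & SPEC =====
def Spec_skip_initial_lines (lines : List String) (out : List String) : Prop := out = skip_initial_lines_alt lines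
instance (lines : List String) (out : List String) : Decidable (Spec_skip_initial_lines lines out) := by unfold Spec_skip_initial_lines; infer_instance

-- ===== CLAIM (what is proved, stated in full; the proofs are below) =====
def Claim_equal_skip_initial_lines : Prop := ∀ (lines : List String), Dom_skip_initial_lines lines → Spec_skip_initial_lines lines (skip_initial_lines lines)

-- ===== LEMMAS AND PROOFS =====

-- ===== VERDICT (by name: the statement is the Claim_ definition above) =====
-- positions of non-comment lines among a pair list
def posOf (pairs : List (Int × String)) : List Int :=
  (pairs.filter (fun p => ¬ PySem.Str.startswith p.2 "#")).map Prod.fst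

theorem skipA_loop_eq (lines : List String) (pairs : List (Int × String)) (count : Int)
    (h0 : 0 ≤ count) (h3 : count < 3) :
    skipA_loop lines pairs count =
      match (posOf pairs)[(2 - count).toNat]? with
      | some i => PySem.List.slice lines (some (i + 1)) none
      | none => lines := by
  induction pairs generalizing count with
  | nil => simp [skipA_loop, posOf]
  | cons hd tl ih =>
    obtain ⟨idx, line⟩ := hd
    by_cases hs : PySem.Chars.startswith line.toList ['#'] = true
    · have h1 : (if ¬ PySem.Str.startswith line "#" = true then count + 1 else count) = count := by
        simp [hs]
      simp only [skipA_loop]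
      rw [h1, if_neg (by omega : ¬ count = 3), ih count h0 h3]
      have h2 : posOf ((idx, line) :: tl) = posOf tl := by simp [posOf, hs]
      rw [h2]
    · have h1 : (if ¬ PySem.Str.startswith line "#" = true then count + 1 else count) = count + 1 := by
        simp [hs]
      have h2 : posOf ((idx, line) :: tl) = idx :: posOf tl := by simp [posOf, hs]
      simp only [skipA_loop]
      rw [h1, h2]
      by_cases he : count + 1 = 3
      · have hc : count = 2 := by omega
        subst hc
        simp
      · rw [if_neg he, ih (count + 1) (by omega) (by omega)]
        have hn : (2 - count).toNat = (2 - (count + 1)).toNat + 1 := by omega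
        rw [hn, List.getElem?_cons_succ]

theorem skip_initial_lines_spec : Claim_equal_skip_initial_lines := by
  intro lines _
  unfold Spec_skip_initial_lines skip_initial_lines skip_initial_lines_alt
  rw [skipA_loop_eq lines _ 0 (by omega) (by omega)]
  have hpos : ((PySem.List.enumerate lines).filter
      (fun p => ¬ PySem.Str.startswith p.2 "#")).map Prod.fst
      = posOf (PySem.List.enumerate lines) := rfl
  simp only [hpos]
  have h23 : ((2 : Int) - 0).toNat = 2 := by omega
  rw [h23]
  by_cases hl : 3 ≤ (posOf (PySem.List.enumerate lines)).length
  · simp only [if_pos hl]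
  · simp only [if_neg hl]
    have : (posOf (PySem.List.enumerate lines))[2]? = none := by
      rw [List.getElem?_eq_none_iff]; omega
    simp [this]
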